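-- pv_equiv track=rewrite | github.com/DaroMateo/PROGRAMACION1 | PROGRAMACION1REC/biblioteca/matrcies.py | contiene_series_consecutivas
-- ===== SOURCE A (Python) =====
-- def contiene_series_consecutivas(matriz):
--     """
--     Verifica si una matriz contiene series de números consecutivos en filas y columnas.
--
--     Parameters:
--     matriz (list): La matriz a verificar.
--
--     Returns:
--     tuple: Un par de listas, la primera para series horizontales y la segunda para series verticales. Cada serie
--     es una lista con los números consecutivos.
--     """
--
--     filas = len(matriz)
--     columnas = len(matriz[0])
--
--     series_horizontales = []  # Lista para almacenar series consecutivas en filas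
--     series_verticales = []     # Lista para almacenar series consecutivas en columnas
--
--     # Verificar consecutivos en filas (horizontal)
--     for i in range(filas):
--         serie_actual = []  # Lista para la serie actual en la fila
--         for j in range(columnas - 1):
--             if int(matriz[i][j]) + 1 == int(matriz[i][j + 1]):
--                 serie_actual.append(int(matriz[i][j]))  # Agregar el número actual a la serie
--             else:
--                 if serie_actual:  # Si hay una serie en curso, la cerramos
--                     serie_actual.append(int(matriz[i][j]))  # Agregar el último número
--                     series_horizontales += [serie_actual]  # Agregar la serie a la lista
--                     serie_actual = []  # Reiniciar la serie actual
--         if serie_actual:  # Si hay una serie al final de la fila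
--             serie_actual += [int(matriz[i][columnas - 1])]  # Agregar el último número
--             series_horizontales += [serie_actual]  # Agregar la serie a la lista
--
--     # Verificar consecutivos en columnas (vertical)
--     for j in range(columnas):
--         serie_actual = []  # Lista para la serie actual en la columna
--         for i in range(filas - 1):
--             if int(matriz[i][j]) + 1 == int(matriz[i + 1][j]):
--                 serie_actual += [int(matriz[i][j])]  # Agregar el número actual a la serie
--             else:
--                 if serie_actual:  # Si hay una serie en curso, la cerramos
--                     serie_actual.append(int(matriz[i][j]))  # Agregar el último número
--                     series_verticales += [serie_actual]  # Agregar la serie a la lista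
--                     serie_actual = []  # Reiniciar la serie actual
--         if serie_actual:  # Si hay una serie al final de la columna
--             serie_actual += [int(matriz[filas - 1][j])]  # Agregar el último número
--             series_verticales += [serie_actual]  # Agregar la serie a la lista
--
--     return series_horizontales, series_verticales
-- ===== SOURCE B (Python) =====
-- def _runs(seq):
--     """Maximal runs of consecutive integers (length >= 2) in seq, in order."""
--     res = []
--     k, n = 0, len(seq)
--     while k < n:
--         m = k + 1
--         while m < n and seq[m] == seq[m - 1] + 1:
--             m += 1
--         if m - k >= 2:
--             res.append(seq[k:m])
--         k = m
--     return res
--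
--
-- def contiene_series_consecutivas(matriz):
--     filas = len(matriz)
--     columnas = len(matriz[0])
--     series_horizontales = []
--     for fila in matriz:
--         series_horizontales += _runs([int(fila[j]) for j in range(columnas)])
--     series_verticales = []
--     for j in range(columnas):
--         series_verticales += _runs([int(matriz[i][j]) for i in range(filas)])
--     return series_horizontales, series_verticales
-- ===== Notes on version B (the rewrite author's own statement) =====
-- stated objective: simpler
-- what changed: A interleaves run detection with iteration via a pending-run accumulator that is flushed on breaks and again at each row/column end; B extracts each row and column as a plain sequence and applies one shared run-splitting helper (maximal consecutive runs of length >= 2), removing the duplicated flush logic.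
import Mathlib
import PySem

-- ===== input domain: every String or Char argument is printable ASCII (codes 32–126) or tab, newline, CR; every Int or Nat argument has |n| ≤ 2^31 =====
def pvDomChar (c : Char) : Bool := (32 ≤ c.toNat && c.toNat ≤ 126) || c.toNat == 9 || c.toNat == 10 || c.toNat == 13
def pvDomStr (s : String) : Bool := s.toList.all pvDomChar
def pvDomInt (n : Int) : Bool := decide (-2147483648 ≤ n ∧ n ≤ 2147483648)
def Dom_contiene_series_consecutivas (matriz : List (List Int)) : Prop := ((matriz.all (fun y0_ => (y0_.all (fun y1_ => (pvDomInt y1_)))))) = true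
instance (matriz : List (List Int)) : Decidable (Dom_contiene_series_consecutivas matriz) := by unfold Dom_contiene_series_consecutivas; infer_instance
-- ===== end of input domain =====

-- B replaces A's per-index state machine (a pending-run accumulator flushed at breaks and at the
-- row/column end) by one shared run-splitting helper applied to each extracted sequence (objective: simpler).

-- shared element access: matriz[i] / fila[j]; exact while Pre_ holds (every index used is in range)
def getRow (matriz : List (List Int)) (i : Int) : List Int := PySem.List.pyGetD matriz i []
def getAt (fila : List Int) (j : Int) : Int := PySem.List.pyGetD fila j 0

-- ===== PORT A =====
def contiene_series_consecutivas (matriz : List (List Int)) : List (List Int) × List (List Int) :=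
  let filas : Int := (matriz.length : Int)
  let columnas : Int := ((getRow matriz 0).length : Int)
  let series_horizontales : List (List Int) :=
    (PySem.List.pyRange 0 filas 1).foldl (fun sh i =>
      let st := (PySem.List.pyRange 0 (columnas - 1) 1).foldl
        (fun (st : List Int × List (List Int)) j =>
          if getAt (getRow matriz i) j + 1 = getAt (getRow matriz i) (j + 1) then
            (st.1 ++ [getAt (getRow matriz i) j], st.2)
          else if st.1 ≠ [] then
            ([], st.2 ++ [st.1 ++ [getAt (getRow matriz i) j]])
          else st) ([], sh)
      if st.1 ≠ [] then st.2 ++ [st.1 ++ [getAt (getRow matriz i) (columnas - 1)]] else st.2) []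
  let series_verticales : List (List Int) :=
    (PySem.List.pyRange 0 columnas 1).foldl (fun sv j =>
      let st := (PySem.List.pyRange 0 (filas - 1) 1).foldl
        (fun (st : List Int × List (List Int)) i =>
          if getAt (getRow matriz i) j + 1 = getAt (getRow matriz (i + 1)) j then
            (st.1 ++ [getAt (getRow matriz i) j], st.2)
          else if st.1 ≠ [] then
            ([], st.2 ++ [st.1 ++ [getAt (getRow matriz i) j]])
          else st) ([], sv)
      if st.1 ≠ [] then st.2 ++ [st.1 ++ [getAt (getRow matriz (filas - 1)) j]] else st.2) []
  (series_horizontales, series_verticales)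

-- ===== PORT B =====
-- inner while loop of _runs: extend the run while the next element is prev + 1;
-- returns (rest of the current run after its first element, remaining sequence)
def takeRun (prev : Int) : List Int → List Int × List Int
  | [] => ([], [])
  | x :: xs =>
    if x = prev + 1 then
      let p := takeRun x xs
      (x :: p.1, p.2)
    else ([], x :: xs)

-- termination fact for runs (the remaining sequence is consumed strictly)
theorem takeRun_snd_length_le (prev : Int) (l : List Int) : (takeRun prev l).2.length ≤ l.length := by
  induction l generalizing prev with
  | nil => simp [takeRun]
  | cons x xs ih =>
    simp only [takeRun]
    split
    · exact Nat.le_succ_of_le (ih x)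
    · simp

-- outer while loop of _runs: split the sequence into maximal consecutive runs, keep length ≥ 2
def runs (l : List Int) : List (List Int) :=
  match l with
  | [] => []
  | x :: xs =>
    let p := takeRun x xs
    if p.1 = [] then runs p.2 else (x :: p.1) :: runs p.2
termination_by l.length
decreasing_by
  all_goals
    have h := takeRun_snd_length_le x xs
    simp only [List.length_cons]
    omega

def contiene_series_consecutivas_alt (matriz : List (List Int)) : List (List Int) × List (List Int) :=
  let filas : Int := (matriz.length : Int)
  let columnas : Int := ((getRow matriz 0).length : Int)
  let series_horizontales : List (List Int) :=
    matriz.foldl (fun acc fila =>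
      acc ++ runs ((PySem.List.pyRange 0 columnas 1).map (fun j => getAt fila j))) []
  let series_verticales : List (List Int) :=
    (PySem.List.pyRange 0 columnas 1).foldl (fun acc j =>
      acc ++ runs ((PySem.List.pyRange 0 filas 1).map (fun i => getAt (getRow matriz i) j))) []
  (series_horizontales, series_verticales)

-- ===== PRECONDITION & SPEC =====
-- Pre_: the Python A raises IndexError exactly on an empty matrix (matriz[0]) and when some row is
-- shorter than the first row (matriz[i][j] for j < len(matriz[0])); it excludes nothing A returns on.
def Pre_contiene_series_consecutivas (matriz : List (List Int)) : Prop :=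
  matriz ≠ [] ∧ ∀ fila ∈ matriz, (matriz.headD []).length ≤ fila.length
instance (matriz : List (List Int)) : Decidable (Pre_contiene_series_consecutivas matriz) := by
  unfold Pre_contiene_series_consecutivas; infer_instance

def pvWitness_contiene_series_consecutivas : List (List Int) := [[1, 2, 5], [4, 3, 4]]

def Spec_contiene_series_consecutivas (matriz : List (List Int)) (out : List (List Int) × List (List Int)) : Prop := out = contiene_series_consecutivas_alt matriz
instance (matriz : List (List Int)) (out : List (List Int) × List (List Int)) : Decidable (Spec_contiene_series_consecutivas matriz out) := by unfold Spec_contiene_series_consecutivas; infer_instance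

-- ===== CLAIM (what is proved, stated in full; the proofs are below) =====
def Claim_equal_contiene_series_consecutivas : Prop := ∀ (matriz : List (List Int)), Dom_contiene_series_consecutivas matriz → Pre_contiene_series_consecutivas matriz → Spec_contiene_series_consecutivas matriz (contiene_series_consecutivas matriz)

-- ===== LEMMAS AND PROOFS =====

-- A's inner-loop step, as a function of the two adjacent values it inspects
def aStep (st : List Int × List (List Int)) (u v : Int) : List Int × List (List Int) :=
  if u + 1 = v then (st.1 ++ [u], st.2)
  else if st.1 ≠ [] then ([], st.2 ++ [st.1 ++ [u]])
  else st

-- A's after-the-loop flush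
def aFinish (st : List Int × List (List Int)) (z : Int) : List (List Int) :=
  if st.1 ≠ [] then st.2 ++ [st.1 ++ [z]] else st.2

-- core invariant: A's pair-by-pair state machine over x :: xs, started with pending run cur,
-- produces exactly the runs that takeRun/runs computes
theorem runFold (xs : List Int) : ∀ (x : Int) (cur : List Int) (acc : List (List Int)),
    aFinish (((x :: xs).zip xs).foldl (fun st p => aStep st p.1 p.2) (cur, acc)) (xs.getLastD x)
      = acc ++ (if cur = [] then runs (x :: xs)
                else (cur ++ x :: (takeRun x xs).1) :: runs (takeRun x xs).2) := by
  induction xs with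
  | nil =>
    intro x cur acc
    cases cur with
    | nil => simp [aFinish, runs, takeRun]
    | cons c cs => simp [aFinish, runs, takeRun]
  | cons y ys ih =>
    intro x cur acc
    rw [show (x :: y :: ys).zip (y :: ys) = (x, y) :: ((y :: ys).zip ys) from rfl]
    simp only [List.foldl_cons]
    have hlast : (y :: ys).getLastD x = ys.getLastD y := by
      cases ys with
      | nil => simp
      | cons a as =>
        obtain ⟨v, hv⟩ := Option.isSome_iff_exists.mp ((a :: as).getLast?_isSome.mpr (by simp))
        simp [List.getLastD_eq_getLast?, hv]
    by_cases hc : x + 1 = y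
    · have hstep : aStep (cur, acc) x y = (cur ++ [x], acc) := by simp [aStep, hc]
      rw [hstep, hlast, ih y (cur ++ [x]) acc]
      have htr : takeRun x (y :: ys) = (y :: (takeRun y ys).1, (takeRun y ys).2) := by
        simp [takeRun, hc.symm]
      cases cur with
      | nil =>
        simp only [htr, List.nil_append, if_neg (List.cons_ne_nil x [])]
        rw [show runs (x :: y :: ys) = (x :: y :: (takeRun y ys).1) :: runs (takeRun y ys).2 by
          rw [runs]; simp [htr]]
        simp
      | cons c cs =>
        simp [htr]
    · have htr : takeRun x (y :: ys) = ([], y :: ys) := by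
        simp [takeRun]; intro h; exact absurd h.symm hc
      cases cur with
      | nil =>
        have hstep : aStep ([], acc) x y = ([], acc) := by simp [aStep, hc]
        rw [hstep, hlast, ih y [] acc]
        rw [show runs (x :: y :: ys) = runs (y :: ys) by rw [runs]; simp [htr]]
        simp
      | cons c cs =>
        have hstep : aStep (c :: cs, acc) x y = ([], acc ++ [(c :: cs) ++ [x]]) := by
          simp [aStep, hc]
        rw [hstep, hlast, ih y [] (acc ++ [(c :: cs) ++ [x]])]
        simp [htr]

-- an index loop over range k reading positions j and j+1 of the sequence a is the
-- pair-by-pair fold over (head :: tail).zip tail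
theorem range_fold_pairs {β : Type} (g : β → Int → Int → β) :
    ∀ (k : Nat) (a : Int → Int) (init : β),
    (List.range k).foldl (fun (st : β) (j : Nat) => g st (a (j : Int)) (a ((j : Int) + 1))) init
      = ((a 0 :: (List.range k).map (fun (j : Nat) => a ((j : Int) + 1))).zip
          ((List.range k).map (fun (j : Nat) => a ((j : Int) + 1)))).foldl (fun st p => g st p.1 p.2) init := by
  intro k
  induction k with
  | zero => intro a init; simp
  | succ k ih =>
    intro a init
    have hT : (List.range (k+1)).map (fun (j : Nat) => a ((j : Int) + 1))
        = a 1 :: (List.range k).map (fun (j : Nat) => a (((j : Int) + 1) + 1)) := by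
      rw [List.range_succ_eq_map]
      simp only [List.map_cons, List.map_map, Nat.cast_zero, zero_add]
      congr 1
    have hL : (List.range (k+1)).foldl (fun (st : β) (j : Nat) => g st (a (j : Int)) (a ((j : Int) + 1))) init
        = (List.range k).foldl (fun (st : β) (j : Nat) => g st (a ((j : Int) + 1)) (a (((j : Int) + 1) + 1)))
            (g init (a 0) (a 1)) := by
      rw [List.range_succ_eq_map]
      simp only [List.foldl_cons, List.foldl_map, Nat.cast_zero, zero_add, Nat.cast_succ]
    rw [hL, hT]
    rw [ih (fun i => a (i + 1)) (g init (a 0) (a 1))]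
    simp only [zero_add]
    rfl

-- A's whole inner loop plus flush over one sequence, abstracted over the access function a
def aInner (a : Int → Int) (n : Int) (acc : List (List Int)) : List (List Int) :=
  aFinish ((PySem.List.pyRange 0 (n - 1) 1).foldl (fun st j => aStep st (a j) (a (j + 1))) ([], acc))
    (a (n - 1))

theorem aInner_eq (a : Int → Int) (c : Nat) (acc : List (List Int)) :
    aInner a (c : Int) acc = acc ++ runs ((List.range c).map (fun (j : Nat) => a (j : Int))) := by
  cases c with
  | zero =>
    unfold aInner
    rw [show ((0 : Nat) : Int) - 1 = -1 by norm_num,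
      PySem.List.pyRange_one_eq_nil (by norm_num : (-1 : Int) ≤ 0)]
    simp [aFinish, runs]
  | succ k =>
    unfold aInner
    rw [show ((k + 1 : Nat) : Int) - 1 = (k : Int) by push_cast; ring]
    rw [PySem.List.pyRange_zero_nat k, List.foldl_map]
    rw [range_fold_pairs aStep k a ([], acc)]
    have hlast : ((List.range k).map (fun (j : Nat) => a ((j : Int) + 1))).getLastD (a 0)
        = a (k : Int) := by
      cases k with
      | zero => simp
      | succ m =>
        rw [List.range_succ, List.map_append]
        simp
    rw [← hlast, runFold _ (a 0) [] acc]
    rw [if_pos rfl]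
    congr 1
    rw [show List.range (k + 1) = 0 :: List.map Nat.succ (List.range k) from List.range_succ_eq_map]
    simp only [List.map_cons, Nat.cast_zero, List.map_map]
    have hm : List.map ((fun (j : Nat) => a (j : Int)) ∘ Nat.succ) (List.range k)
        = List.map (fun (j : Nat) => a ((j : Int) + 1)) (List.range k) := by
      apply List.map_congr_left
      intro j _
      simp [Nat.cast_succ]
    rw [hm]

-- A's port, rewritten as two folds of aInner (pure unfolding)
theorem portA_eq (matriz : List (List Int)) : contiene_series_consecutivas matriz =
    ((PySem.List.pyRange 0 (matriz.length : Int) 1).foldl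
        (fun sh i => aInner (fun j => getAt (getRow matriz i) j) ((getRow matriz 0).length : Int) sh) [],
     (PySem.List.pyRange 0 ((getRow matriz 0).length : Int) 1).foldl
        (fun sv j => aInner (fun i => getAt (getRow matriz i) j) (matriz.length : Int) sv) []) := by
  simp only [contiene_series_consecutivas, aInner, aStep, aFinish]

theorem main_eq (matriz : List (List Int)) :
    contiene_series_consecutivas matriz = contiene_series_consecutivas_alt matriz := by
  rw [portA_eq]
  simp only [contiene_series_consecutivas_alt]
  have hseq : ∀ (fila : List Int) (c : Nat),
      (PySem.List.pyRange 0 (c : Int) 1).map (fun j => getAt fila j)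
        = (List.range c).map (fun (jn : Nat) => getAt fila (jn : Int)) := by
    intro fila c
    rw [PySem.List.pyRange_zero_nat, List.map_map]
    rfl
  have hseq2 : ∀ (j : Int),
      (PySem.List.pyRange 0 (matriz.length : Int) 1).map (fun i => getAt (getRow matriz i) j)
        = (List.range matriz.length).map (fun (inat : Nat) => getAt (getRow matriz (inat : Int)) j) := by
    intro j
    rw [PySem.List.pyRange_zero_nat, List.map_map]
    rfl
  simp only [Prod.mk.injEq]
  refine ⟨?_, ?_⟩
  · rw [PySem.List.foldl_congr_mem _ _
      (fun sh i => sh ++ runs ((List.range (getRow matriz 0).length).map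
        (fun (jn : Nat) => getAt (getRow matriz i) (jn : Int)))) _
      (fun acc x _ => aInner_eq (fun j => getAt (getRow matriz x) j) (getRow matriz 0).length acc)]
    simp only [hseq]
    simp only [getRow]
    exact PySem.List.foldl_pyRange_zero_pyGetD' matriz ([] : List Int)
      (fun acc fila => acc ++ runs ((List.range (PySem.List.pyGetD matriz 0 []).length).map
        (fun (jn : Nat) => getAt fila (jn : Int)))) ([] : List (List Int))
  · rw [PySem.List.foldl_congr_mem _ _
      (fun sv j => sv ++ runs ((List.range matriz.length).map
        (fun (inat : Nat) => getAt (getRow matriz (inat : Int)) j))) _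
      (fun acc x _ => aInner_eq (fun i => getAt (getRow matriz i) x) matriz.length acc)]
    simp only [hseq2]

-- ===== VERDICT (by name: the statement is the Claim_ definition above) =====
theorem contiene_series_consecutivas_spec : Claim_equal_contiene_series_consecutivas := by
  intro matriz _ _
  unfold Spec_contiene_series_consecutivas
  exact main_eq matriz
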